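-- pv_equiv track=rewrite | github.com/Vincent-Therrien/path_reconstructor | path_reconstructor/log_sequences.py | match_reconstruction
-- ===== SOURCE A (Python) =====
-- def match_reconstruction(real: list, reconstructed: list) -> list:
--     """Match a reconstructed execution path to the real execution path by
--     adding empty elements between nodes.
--
--     Args:
--         real: List of subroutine executions.
--         reconstructed: List of reconstructed subroutine executions.
--
--     Returns:
--         Matched execution path."""
--     matched = []
--     r_index = 0
--     for node in real:
--         if r_index == len(reconstructed):
--             matched.append(' ')
--         elif node == reconstructed[r_index]:
--             matched.append(node)
--             r_index += 1
--         else: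
--             matched.append(' ')
--     return matched
-- ===== SOURCE B (Python) =====
-- def match_reconstruction(real: list, reconstructed: list) -> list:
--     """Match a reconstructed execution path to the real execution path by
--     adding empty elements between nodes."""
--     matched = [' '] * len(real)
--     i = 0
--     for node in reconstructed:
--         while i < len(real) and real[i] != node:
--             i += 1
--         if i == len(real):
--             break
--         matched[i] = node
--         i += 1
--     return matched
-- ===== Notes on version B (the rewrite author's own statement) =====
-- stated objective: alternative
-- what changed: B pre-fills the output with ' ' of length len(real) and inverts the traversal: it loops over reconstructed, scans forward through real for each node, writes matches in place and breaks once real is exhausted, instead of A's single pass over real with a pointer into reconstructed.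
import Mathlib
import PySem

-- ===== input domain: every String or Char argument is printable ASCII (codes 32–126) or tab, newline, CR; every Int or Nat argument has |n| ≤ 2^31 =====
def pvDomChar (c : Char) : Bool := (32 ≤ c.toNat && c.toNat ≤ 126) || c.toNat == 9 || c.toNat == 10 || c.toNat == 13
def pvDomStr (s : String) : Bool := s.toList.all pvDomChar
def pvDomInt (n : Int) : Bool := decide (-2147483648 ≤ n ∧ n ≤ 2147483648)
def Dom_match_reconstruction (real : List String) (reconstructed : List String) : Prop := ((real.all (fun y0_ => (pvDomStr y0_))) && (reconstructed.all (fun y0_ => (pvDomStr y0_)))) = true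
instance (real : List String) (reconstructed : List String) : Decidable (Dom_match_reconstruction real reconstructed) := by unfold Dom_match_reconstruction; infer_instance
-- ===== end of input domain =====

-- B pre-fills a ' '-filled result and loops over `reconstructed` with a forward scan through
-- `real`, instead of A's single pass over `real` with a pointer into `reconstructed`
-- (objective: alternative decomposition, same behaviour).


-- ===== PORT A =====
-- 'for node in real' with state (matched, r_index); branches in Python's order.
def mrGoA (reconstructed : List String) : List String → Nat → List String
  | [], _ => []
  | node :: rest, r =>
    if r = reconstructed.length then
      " " :: mrGoA reconstructed rest r
    else if PySem.List.pyGet? reconstructed (r : Int) = some node then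
      node :: mrGoA reconstructed rest (r + 1)
    else
      " " :: mrGoA reconstructed rest r

def match_reconstruction (real : List String) (reconstructed : List String) : List String :=
  mrGoA reconstructed real 0

-- ===== PORT B =====
-- the inner 'while i < len(real) and real[i] != node: i += 1'
def mrAdv (real : List String) (node : String) (i : Nat) : Nat :=
  if h : i < real.length then
    if real[i] = node then i else mrAdv real node (i + 1)
  else i
termination_by real.length - i

-- 'for node in reconstructed' mutating the pre-filled result list; 'break' = return result.
def mrGoB (real : List String) : List String → List String → Nat → List String
  | [], result, _ => result
  | node :: rest, result, i =>
    let j := mrAdv real node i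
    if j = real.length then result
    else mrGoB real rest (result.set j node) (j + 1)

def match_reconstruction_alt (real : List String) (reconstructed : List String) : List String :=
  mrGoB real reconstructed (List.replicate real.length " ") 0

-- ===== PRECONDITION & SPEC =====
def Spec_match_reconstruction (real : List String) (reconstructed : List String) (out : List String) : Prop := out = match_reconstruction_alt real reconstructed
instance (real : List String) (reconstructed : List String) (out : List String) : Decidable (Spec_match_reconstruction real reconstructed out) := by unfold Spec_match_reconstruction; infer_instance

-- ===== CLAIM (what is proved, stated in full; the proofs are below) =====
def Claim_equal_match_reconstruction : Prop := ∀ (real : List String) (reconstructed : List String), Dom_match_reconstruction real reconstructed → Spec_match_reconstruction real reconstructed (match_reconstruction real reconstructed)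

-- ===== LEMMAS AND PROOFS =====

-- proof-side reformulation of A: consume reconstructed as a list instead of indexing it
def mrGoA' : List String → List String → List String
  | [], _ => []
  | _ :: rest, [] => " " :: mrGoA' rest []
  | node :: rest, c :: cs =>
    if node = c then node :: mrGoA' rest cs else " " :: mrGoA' rest (c :: cs)

lemma mrGoA_eq_goA' (reconstructed : List String) :
    ∀ (real : List String) (r : Nat), r ≤ reconstructed.length →
      mrGoA reconstructed real r = mrGoA' real (reconstructed.drop r) := by
  intro real
  induction real with
  | nil => intro r _; simp [mrGoA, mrGoA']
  | cons node rest ih =>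
    intro r hr
    by_cases hlen : r = reconstructed.length
    · subst hlen
      simp only [mrGoA, List.drop_length]
      have := ih _ le_rfl
      rw [List.drop_length] at this
      simp [mrGoA', this]
    · have hr' : r < reconstructed.length := lt_of_le_of_ne hr hlen
      have hget : PySem.List.pyGet? reconstructed (r : Int) = some reconstructed[r] := by
        simp [List.getElem?_eq_getElem hr']
      have hdrop : reconstructed.drop r = reconstructed[r] :: reconstructed.drop (r + 1) :=
        List.drop_eq_getElem_cons hr'
      by_cases heq : reconstructed[r] = node
      · rw [mrGoA, if_neg hlen, if_pos (by rw [hget, heq]), hdrop, heq, mrGoA',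
          if_pos rfl, ih _ hr']
      · rw [mrGoA, if_neg hlen, if_neg (by rw [hget]; simpa using heq), ih _ hr, hdrop,
          mrGoA', if_neg (fun h => heq h.symm)]

-- main invariant: goB with a ' '-suffixed result computes take i ++ goA' on the real-suffix.
-- the inner while loop is handled by recursion on real.length - i (whence the lex measure).
lemma mrGoB_eq (real : List String) :
    ∀ (recon : List String) (i : Nat) (result : List String),
      result.length = real.length →
      result.drop i = List.replicate (real.length - i) " " →
      mrGoB real recon result i = result.take i ++ mrGoA' (real.drop i) recon := by
  intro recon i result hlen hdrop
  match recon with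
  | [] =>
    have : mrGoA' (real.drop i) [] = List.replicate (real.drop i).length " " := by
      induction (real.drop i) with
      | nil => simp [mrGoA']
      | cons x xs ih => simp [mrGoA', ih, List.replicate_succ]
    rw [mrGoB, this, List.length_drop, ← hdrop, List.take_append_drop]
  | c :: cs =>
    by_cases hi : i < real.length
    · by_cases hc : real[i] = c
      · -- immediate hit: mrAdv real c i = i
        have hadv : mrAdv real c i = i := by rw [mrAdv]; simp [hi, hc]
        have hdrop' : (result.set i c).drop (i + 1) = List.replicate (real.length - (i + 1)) " " := by
          rw [List.drop_set_of_lt (by omega)]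
          have : result.drop (i + 1) = (result.drop i).drop 1 := by
            rw [List.drop_drop]
          rw [this, hdrop, List.drop_replicate, Nat.sub_sub]
        have hres := mrGoB_eq real cs (i + 1) (result.set i c)
          (by simpa using hlen) hdrop'
        rw [mrGoB]
        simp only [hadv]
        rw [if_neg (by omega), hres]
        have hreal : real.drop i = c :: real.drop (i + 1) := by
          rw [List.drop_eq_getElem_cons hi, hc]
        have htake : (result.set i c).take (i + 1) = result.take i ++ [c] := by
          rw [List.take_add_one, List.getElem?_set_self (by omega), List.take_set,
            List.set_eq_of_length_le (by rw [List.length_take]; omega)]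
          simp
        rw [hreal, mrGoA', if_pos rfl, htake]
        simp
      · -- skip: result[i] = ' ', step i → i+1
        have hstep : mrAdv real c i = mrAdv real c (i + 1) := by
          rw [mrAdv]; simp [hi, hc]
        have hgetres : result[i]'(by omega) = " " := by
          have h1 : result[i]'(by omega) = (result.drop i)[0]'(by simp; omega) := by
            simp
          rw [h1]
          simp [hdrop]
        have hdrop' : result.drop (i + 1) = List.replicate (real.length - (i + 1)) " " := by
          have : result.drop (i + 1) = (result.drop i).drop 1 := by rw [List.drop_drop]
          rw [this, hdrop, List.drop_replicate, Nat.sub_sub]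
        have hres := mrGoB_eq real (c :: cs) (i + 1) result hlen hdrop'
        rw [mrGoB] at hres ⊢
        simp only [hstep]
        rw [hres]
        have hreal : real.drop i = real[i] :: real.drop (i + 1) :=
          List.drop_eq_getElem_cons hi
        have htake : result.take (i + 1) = result.take i ++ [" "] := by
          rw [List.take_add_one]
          simp [List.getElem?_eq_getElem (by omega : i < result.length), hgetres]
        rw [hreal, mrGoA', if_neg hc, htake]
        simp
    · -- i ≥ len(real): the while loop does not move; either break (i = len) or a no-op set
      have hadv : mrAdv real c i = i := by rw [mrAdv]; simp [hi]
      have hdropnil : real.drop i = [] := List.drop_eq_nil_of_le (by omega)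
      by_cases hieq : i = real.length
      · rw [mrGoB]
        simp only [hadv, if_pos hieq, hdropnil, mrGoA']
        rw [List.take_of_length_le (by omega)]
        simp
      · have hset : result.set i c = result := List.set_eq_of_length_le (by omega)
        have hdrop' : result.drop (i + 1) = List.replicate (real.length - (i + 1)) " " := by
          rw [List.drop_eq_nil_of_le (by omega)]
          have : real.length - (i + 1) = 0 := by omega
          simp [this]
        have hres := mrGoB_eq real cs (i + 1) result hlen hdrop'
        rw [mrGoB]
        simp only [hadv, if_neg hieq, hset]
        rw [hres, hdropnil, List.drop_eq_nil_of_le (by omega : real.length ≤ i + 1)]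
        rw [List.take_of_length_le (by omega), List.take_of_length_le (by omega)]
        simp [mrGoA']
termination_by recon i => (recon.length, real.length - i)

theorem match_reconstruction_spec : Claim_equal_match_reconstruction := by
  intro real reconstructed _
  unfold Spec_match_reconstruction match_reconstruction match_reconstruction_alt
  rw [mrGoA_eq_goA' reconstructed real 0 (Nat.zero_le _),
    mrGoB_eq real reconstructed 0 (List.replicate real.length " ") (by simp) (by simp)]
  simp
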